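-- pv_equiv track=rewrite | github.com/harunardi/dissertation_codes | SRC/XSPROCESS_2D_HEXX.py | convert_2D_hexx
-- ===== SOURCE A (Python) =====
-- def convert_2D_hexx(I_max, J_max, D):
--     conv_hexx = [0] * (I_max*J_max)
--     tmp_conv = 0
--     for j in range(J_max):
--         for i in range(I_max):
--             if D[0][j][i] != 0:
--                 tmp_conv += 1
--                 m = j * I_max + i
--                 conv_hexx[m] = tmp_conv
--
--     return conv_hexx
-- ===== SOURCE B (Python) =====
-- def convert_2D_hexx(I_max, J_max, D):
--     mask = [1 if D[0][j][i] != 0 else 0 for j in range(J_max) for i in range(I_max)]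
--     pref = []
--     s = 0
--     for m in mask:
--         s += m
--         pref.append(s)
--     return [p if m else 0 for m, p in zip(mask, pref)]
-- ===== Notes on version B (the rewrite author's own statement) =====
-- stated objective: alternative
-- what changed: Replaced the accumulator-threaded in-place fill of a preallocated [0]*(I*J) buffer by a three-stage pipeline: build a flat 0/1 mask in the same (j,i) order, take its running prefix sums, then mask the prefix sums back to zeros.
-- intended difference: When both I_max and J_max are negative (so I_max*J_max > 0), A returns a nonempty list of I_max*J_max zeros from its [0]*(I_max*J_max) preallocation even though the grid has no cells; B returns [], the intended value for an empty iteration grid. — e.g. on convert_2D_hexx(-1, -1, []): A returns [0], B returns []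
import Mathlib
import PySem

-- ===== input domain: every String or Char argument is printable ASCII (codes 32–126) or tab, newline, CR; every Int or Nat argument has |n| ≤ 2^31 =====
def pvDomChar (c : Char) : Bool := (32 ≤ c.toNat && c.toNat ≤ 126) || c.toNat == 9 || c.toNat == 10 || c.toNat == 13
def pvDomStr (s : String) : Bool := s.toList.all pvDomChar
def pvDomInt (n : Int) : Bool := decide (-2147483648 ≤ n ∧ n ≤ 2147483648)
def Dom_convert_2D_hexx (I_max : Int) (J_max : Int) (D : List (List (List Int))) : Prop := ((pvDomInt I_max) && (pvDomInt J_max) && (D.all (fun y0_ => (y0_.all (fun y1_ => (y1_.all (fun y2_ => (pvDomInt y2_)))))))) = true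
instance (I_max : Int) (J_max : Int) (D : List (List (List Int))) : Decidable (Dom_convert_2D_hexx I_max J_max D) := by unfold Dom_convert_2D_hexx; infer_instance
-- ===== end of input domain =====

-- B replaces A's counter-threaded in-place fill of a preallocated zero buffer by a
-- mask / prefix-sum / re-mask pipeline (alternative decomposition, same cost);
-- for doubly-negative dimensions B returns [] where A returns a nonempty zero list (D_ below).

-- ===== PORT A =====
-- D[0][j][i]; total with defaults — inside Pre_ every access is in range (exact there)
def pvGet3 (D : List (List (List Int))) (j i : Int) : Int :=
  PySem.List.pyGetD (PySem.List.pyGetD (PySem.List.pyGetD D 0 []) j []) i 0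

def convert_2D_hexx (I_max : Int) (J_max : Int) (D : List (List (List Int))) : List Int :=
  let conv_hexx : List Int := List.replicate (I_max * J_max).toNat 0
  let r := (PySem.List.pyRange 0 J_max 1).foldl (fun (st : List Int × Int) j =>
      (PySem.List.pyRange 0 I_max 1).foldl (fun (st : List Int × Int) i =>
        if pvGet3 D j i ≠ 0 then
          let tmp := st.2 + 1
          let m := j * I_max + i
          (PySem.List.pySetD st.1 m tmp, tmp)
        else st) st) (conv_hexx, 0)
  r.1

-- ===== PORT B =====
def convert_2D_hexx_alt (I_max : Int) (J_max : Int) (D : List (List (List Int))) : List Int :=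
  let mask : List Int := (PySem.List.pyRange 0 J_max 1).flatMap (fun j =>
      (PySem.List.pyRange 0 I_max 1).map (fun i => if pvGet3 D j i ≠ 0 then 1 else 0))
  let pref : List Int := (mask.foldl (fun (acc : List Int × Int) m =>
      (acc.1 ++ [acc.2 + m], acc.2 + m)) (([] : List Int), 0)).1
  List.zipWith (fun m p => if m ≠ 0 then p else 0) mask pref

-- ===== PRECONDITION & SPEC =====
-- Pre_ excludes exactly the inputs on which A raises IndexError (only reachable when both
-- dimensions are positive and D[0][j][i] indexing fails for some visited cell).
def Pre_convert_2D_hexx (I_max : Int) (J_max : Int) (D : List (List (List Int))) : Prop :=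
  0 < I_max → 0 < J_max →
    (1 ≤ D.length ∧ J_max ≤ ((D.getD 0 []).length : Int) ∧
      ∀ row ∈ (D.getD 0 []).take J_max.toNat, I_max ≤ (row.length : Int))
instance (I_max : Int) (J_max : Int) (D : List (List (List Int))) : Decidable (Pre_convert_2D_hexx I_max J_max D) := by unfold Pre_convert_2D_hexx; infer_instance

def pvWitness_convert_2D_hexx : Int × Int × List (List (List Int)) := (2, 2, [[[0, 3], [7, 0]]])

-- When both I_max and J_max are negative (so I_max*J_max > 0), A returns a nonempty list of
-- I_max*J_max zeros from its [0]*(I_max*J_max) preallocation even though the grid has no cells;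
-- B returns [], the intended value for an empty iteration grid.
def D_convert_2D_hexx (I_max : Int) (J_max : Int) (D : List (List (List Int))) : Prop :=
  I_max < 0 ∧ J_max < 0
instance (I_max : Int) (J_max : Int) (D : List (List (List Int))) : Decidable (D_convert_2D_hexx I_max J_max D) := by unfold D_convert_2D_hexx; infer_instance

def Spec_convert_2D_hexx (I_max : Int) (J_max : Int) (D : List (List (List Int))) (out : List Int) : Prop := ¬ D_convert_2D_hexx I_max J_max D → out = convert_2D_hexx_alt I_max J_max D
instance (I_max : Int) (J_max : Int) (D : List (List (List Int))) (out : List Int) : Decidable (Spec_convert_2D_hexx I_max J_max D out) := by unfold Spec_convert_2D_hexx; infer_instance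

def pvDiffWitness_convert_2D_hexx : Int × Int × List (List (List Int)) := (-1, -1, [])
def pvDiffWitnessOut_convert_2D_hexx : (List Int) × (List Int) := ([0], [])

-- ===== CLAIM (what is proved, stated in full; the proofs are below) =====
def Claim_unchanged_convert_2D_hexx : Prop := ∀ (I_max : Int) (J_max : Int) (D : List (List (List Int))), Dom_convert_2D_hexx I_max J_max D → Pre_convert_2D_hexx I_max J_max D → Spec_convert_2D_hexx I_max J_max D (convert_2D_hexx I_max J_max D)
def Claim_changed_convert_2D_hexx : Prop := Dom_convert_2D_hexx (pvDiffWitness_convert_2D_hexx.1) (pvDiffWitness_convert_2D_hexx.2.1) (pvDiffWitness_convert_2D_hexx.2.2) ∧ Pre_convert_2D_hexx (pvDiffWitness_convert_2D_hexx.1) (pvDiffWitness_convert_2D_hexx.2.1) (pvDiffWitness_convert_2D_hexx.2.2) ∧ D_convert_2D_hexx (pvDiffWitness_convert_2D_hexx.1) (pvDiffWitness_convert_2D_hexx.2.1) (pvDiffWitness_convert_2D_hexx.2.2) ∧ convert_2D_hexx (pvDiffWitness_convert_2D_hexx.1) (pvDiffWitness_convert_2D_hexx.2.1) (pvDiffWitness_convert_2D_hexx.2.2)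 = pvDiffWitnessOut_convert_2D_hexx.1 ∧ convert_2D_hexx_alt (pvDiffWitness_convert_2D_hexx.1) (pvDiffWitness_convert_2D_hexx.2.1) (pvDiffWitness_convert_2D_hexx.2.2) = pvDiffWitnessOut_convert_2D_hexx.2 ∧ pvDiffWitnessOut_convert_2D_hexx.1 ≠ pvDiffWitnessOut_convert_2D_hexx.2
def Claim_exact_convert_2D_hexx : Prop := ∀ (I_max : Int) (J_max : Int) (D : List (List (List Int))), Dom_convert_2D_hexx I_max J_max D → Pre_convert_2D_hexx I_max J_max D → D_convert_2D_hexx I_max J_max D → convert_2D_hexx I_max J_max D ≠ convert_2D_hexx_alt I_max J_max D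

-- ===== LEMMAS AND PROOFS =====

-- labelled row/result recursion with the final counter: pvBT ms t = (labels, final counter)
def pvBT : List Int → Int → List Int × Int
  | [], t => ([], t)
  | m :: ms, t =>
      if m ≠ 0 then
        let r := pvBT ms (t + 1); ((t + 1) :: r.1, r.2)
      else
        let r := pvBT ms t; (0 :: r.1, r.2)

theorem pvBT_length (ms : List Int) (t : Int) : (pvBT ms t).1.length = ms.length := by
  induction ms generalizing t with
  | nil => rfl
  | cons m ms ih => by_cases h : m = 0 <;> simp [pvBT, h, ih]

theorem pvBT_append (ms ns : List Int) (t : Int) :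
    pvBT (ms ++ ns) t = ((pvBT ms t).1 ++ (pvBT ns (pvBT ms t).2).1, (pvBT ns (pvBT ms t).2).2) := by
  induction ms generalizing t with
  | nil => simp [pvBT]
  | cons m ms ih => by_cases h : m = 0 <;> simp [pvBT, h, ih]

-- running prefix sums starting from t
def pvScan : List Int → Int → List Int
  | [], _ => []
  | m :: ms, t => (t + m) :: pvScan ms (t + m)

theorem pvFold_pref (ms : List Int) (l : List Int) (t : Int) :
    (ms.foldl (fun (acc : List Int × Int) m => (acc.1 ++ [acc.2 + m], acc.2 + m)) (l, t)).1
      = l ++ pvScan ms t := by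
  induction ms generalizing l t with
  | nil => simp [pvScan]
  | cons m ms ih => simp [pvScan, ih]

theorem pvZip_scan (ms : List Int) (t : Int) (h01 : ∀ m ∈ ms, m = 0 ∨ m = 1) :
    List.zipWith (fun m p => if m ≠ 0 then p else 0) ms (pvScan ms t) = (pvBT ms t).1 := by
  induction ms generalizing t with
  | nil => rfl
  | cons m ms ih =>
      have htail : ∀ x ∈ ms, x = 0 ∨ x = 1 := fun x hx => h01 x (List.mem_cons_of_mem _ hx)
      rcases h01 m (by simp) with h | h <;> subst h
      · simp only [pvScan, List.zipWith_cons_cons, add_zero]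
        rw [ih t htail]; simp [pvBT]
      · simp only [pvScan, List.zipWith_cons_cons]
        rw [ih (t + 1) htail]; simp [pvBT]

theorem pvInner (D : List (List (List Int))) (I j : Int) (hj : 0 ≤ j) (hI : 0 ≤ I) :
    ∀ (c : ℕ) (b : Int), b = I - c → 0 ≤ b → ∀ (pre : List Int) (t : Int) (z : ℕ),
      (pre.length : Int) = j * I + b → c ≤ z →
      (PySem.List.pyRange b I 1).foldl (fun (st : List Int × Int) i =>
          if pvGet3 D j i ≠ 0 then
            (PySem.List.pySetD st.1 (j * I + i) (st.2 + 1), st.2 + 1)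
          else st) (pre ++ List.replicate z 0, t)
        = (pre ++ (pvBT ((PySem.List.pyRange b I 1).map
              (fun i => if pvGet3 D j i ≠ 0 then (1 : Int) else 0)) t).1
             ++ List.replicate (z - c) 0,
           (pvBT ((PySem.List.pyRange b I 1).map
              (fun i => if pvGet3 D j i ≠ 0 then (1 : Int) else 0)) t).2) := by
  intro c
  induction c with
  | zero =>
      intro b hb hb0 pre t z hlen hz
      have hIb : I ≤ b := by omega
      rw [PySem.List.pyRange_one_eq_nil hIb]
      simp [pvBT]
  | succ c ih =>
      intro b hb hb0 pre t z hlen hz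
      have hbI : b < I := by omega
      rw [PySem.List.pyRange_one_cons hbI]
      have hz1 : 1 ≤ z := by omega
      have hset : ∀ v : Int,
          PySem.List.pySetD (pre ++ List.replicate z 0) (j * I + b) v
            = (pre ++ [v]) ++ List.replicate (z - 1) 0 := by
        intro v
        have hnn : (0 : Int) ≤ j * I + b := by
          have := mul_nonneg hj hI; omega
        rw [PySem.List.pySetD_of_nonneg _ v hnn]
        have hidx : (j * I + b).toNat = pre.length := by omega
        rw [hidx]
        have hrep : List.replicate z (0 : Int) = 0 :: List.replicate (z - 1) 0 := by
          cases z with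
          | zero => omega
          | succ z' => simp [List.replicate_succ]
        rw [hrep]
        simp
      by_cases hgz : pvGet3 D j b = 0
      · simp only [List.foldl_cons, List.map_cons, hgz, ne_eq, not_true_eq_false, if_false, pvBT]
        have hrw : pre ++ List.replicate z (0 : Int) = (pre ++ [0]) ++ List.replicate (z - 1) 0 := by
          have hrep : List.replicate z (0 : Int) = 0 :: List.replicate (z - 1) 0 := by
            cases z with
            | zero => omega
            | succ z' => simp [List.replicate_succ]
          rw [hrep]; simp
        rw [hrw, ih (b + 1) (by omega) (by omega) (pre ++ [0]) t (z - 1)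
          (by simp; omega) (by omega)]
        simp
        omega
      · simp only [List.foldl_cons, List.map_cons, hgz, ne_eq, not_false_eq_true, if_true,
          pvBT, one_ne_zero]
        rw [hset (t + 1), ih (b + 1) (by omega) (by omega) (pre ++ [t + 1]) (t + 1) (z - 1)
          (by simp; omega) (by omega)]
        simp
        omega

theorem pvOuter (D : List (List (List Int))) (I J : Int) (hI : 0 < I) :
    ∀ (c : ℕ) (a : Int), a = J - c → 0 ≤ a → ∀ (pre : List Int) (t : Int) (z : ℕ),
      (pre.length : Int) = a * I → (z : Int) = (J - a) * I →
      (PySem.List.pyRange a J 1).foldl (fun (st : List Int × Int) j =>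
          (PySem.List.pyRange 0 I 1).foldl (fun (st : List Int × Int) i =>
            if pvGet3 D j i ≠ 0 then
              (PySem.List.pySetD st.1 (j * I + i) (st.2 + 1), st.2 + 1)
            else st) st) (pre ++ List.replicate z 0, t)
        = (pre ++ (pvBT ((PySem.List.pyRange a J 1).flatMap (fun j =>
              (PySem.List.pyRange 0 I 1).map
                (fun i => if pvGet3 D j i ≠ 0 then (1 : Int) else 0))) t).1,
           (pvBT ((PySem.List.pyRange a J 1).flatMap (fun j =>
              (PySem.List.pyRange 0 I 1).map
                (fun i => if pvGet3 D j i ≠ 0 then (1 : Int) else 0))) t).2) := by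
  intro c
  induction c with
  | zero =>
      intro a ha ha0 pre t z hlen hz
      have hJa : J ≤ a := by omega
      rw [PySem.List.pyRange_one_eq_nil hJa]
      have hz0 : z = 0 := by
        have : (J - a) * I ≤ 0 := mul_nonpos_of_nonpos_of_nonneg (by omega) (le_of_lt hI)
        omega
      simp [pvBT, hz0]
  | succ c ih =>
      intro a ha ha0 pre t z hlen hz
      have haJ : a < J := by omega
      rw [PySem.List.pyRange_one_cons haJ]
      simp only [List.foldl_cons, List.flatMap_cons]
      have hIeq : (0 : Int) = I - (I.toNat : ℕ) := by omega
      have hzI : (I.toNat : ℕ) ≤ z := by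
        have h1 : (1 : Int) ≤ J - a := by omega
        have := mul_le_mul_of_nonneg_right h1 (le_of_lt hI)
        omega
      rw [pvInner D I a ha0 (le_of_lt hI) I.toNat 0 hIeq le_rfl pre t z (by omega) hzI]
      have hlen1 : (((pre ++ (pvBT ((PySem.List.pyRange 0 I 1).map
          (fun i => if pvGet3 D a i ≠ 0 then (1 : Int) else 0)) t).1).length : Int))
            = (a + 1) * I := by
        simp [pvBT_length, PySem.List.length_pyRange_one]
        rw [add_one_mul]
        omega
      rw [ih (a + 1) (by omega) (by omega) _ _ (z - I.toNat) hlen1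
        (by push_cast [hzI]; rw [sub_add_eq_sub_sub, sub_one_mul]; omega)]
      rw [pvBT_append]
      simp
theorem pvMask01 (D : List (List (List Int))) (I J : Int) :
    ∀ m ∈ (PySem.List.pyRange 0 J 1).flatMap (fun j =>
      (PySem.List.pyRange 0 I 1).map (fun i => if pvGet3 D j i ≠ 0 then (1 : Int) else 0)),
      m = 0 ∨ m = 1 := by
  intro m hm
  simp only [List.mem_flatMap, List.mem_map] at hm
  obtain ⟨j, -, i, -, rfl⟩ := hm
  by_cases h : pvGet3 D j i = 0 <;> simp [h]

theorem convert_2D_hexx_spec : Claim_unchanged_convert_2D_hexx := by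
  intro I J D hDom hPre
  unfold Spec_convert_2D_hexx
  intro hnD
  unfold D_convert_2D_hexx at hnD
  simp only [convert_2D_hexx, convert_2D_hexx_alt]
  by_cases hJ : 0 < J
  · by_cases hI : 0 < I
    · -- main case
      have hz : (((I * J).toNat : ℕ) : Int) = (J - 0) * I := by
        rw [Int.toNat_of_nonneg (mul_nonneg (le_of_lt hI) (le_of_lt hJ))]
        ring
      have hA := pvOuter D I J hI J.toNat 0 (by omega) le_rfl [] 0 (I * J).toNat
        (by simp) hz
      simp only [List.nil_append] at hA
      rw [hA]
      rw [pvFold_pref]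
      simp only [List.nil_append]
      rw [pvZip_scan _ 0 (pvMask01 D I J)]
    · -- J > 0, I ≤ 0: empty inner range, empty mask, empty result
      have hIr : PySem.List.pyRange 0 I 1 = [] := PySem.List.pyRange_one_eq_nil (by omega)
      have hIJ : I * J ≤ 0 := mul_nonpos_of_nonpos_of_nonneg (by omega) (le_of_lt hJ)
      have htn : (I * J).toNat = 0 := by omega
      simp [hIr, htn]
  · -- J ≤ 0: empty outer range; with ¬(I < 0 ∧ J < 0) the buffer is empty too
    have hJr : PySem.List.pyRange 0 J 1 = [] := PySem.List.pyRange_one_eq_nil (by omega)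
    have hIJ : I * J ≤ 0 := by
      rcases lt_or_ge I 0 with hI | hI
      · have hJ0 : J = 0 := by omega
        simp [hJ0]
      · exact mul_nonpos_of_nonneg_of_nonpos hI (by omega)
    have htn : (I * J).toNat = 0 := by omega
    simp [hJr, htn]

theorem convert_2D_hexx_tight : Claim_exact_convert_2D_hexx := by
  intro I J D hDom hPre hD
  obtain ⟨hI, hJ⟩ := hD
  have hJr : PySem.List.pyRange 0 J 1 = [] := PySem.List.pyRange_one_eq_nil (by omega)
  have hpos : 0 < I * J := mul_pos_of_neg_of_neg hI hJ
  simp only [convert_2D_hexx, convert_2D_hexx_alt, hJr, List.foldl_nil, List.flatMap_nil,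
    List.zipWith_nil_left]
  intro h
  have := congrArg List.length h
  simp at this
  omega

-- ===== VERDICT (by name: the statement is the Claim_ definition above) =====
theorem convert_2D_hexx_changed : Claim_changed_convert_2D_hexx := by
  unfold Claim_changed_convert_2D_hexx; decide
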